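-- pv_equiv track=rewrite | github.com/batoul45/Python_Test | python/Minimuim.py | find_minimuim
-- ===== SOURCE A (Python) =====
-- def find_minimuim(arr):
--     # Assume the first row has the minimum sum initially
--     min_row_index = 0
--     min_row_sum = sum(arr[0])
--
--     # we use the loop to find the row with the minimum sum
--     for i in range(1, len(arr)):
--         row_sum = sum(arr[i])
--         if row_sum < min_row_sum:
--             min_row_sum = row_sum
--             min_row_index = i
--
--     # Assume the first column has the minimum sum initially
--     min_col_index = 0
--     min_col_sum = sum(row[0] for row in arr)
--
--     # Loop each column to find the minimum sum and its column
--     for j in range(1, len(arr[0])):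
--         col_sum = sum(row[j] for row in arr)
--         if col_sum < min_col_sum:
--             min_col_sum = col_sum
--             min_col_index = j
--
--     # Return the row and column indices with the minimum sums
--     return [min_row_index, min_col_index]
-- ===== SOURCE B (Python) =====
-- def find_minimuim(arr):
--     # One row-major pass building the row-sum list and a running column-sum
--     # table (zip truncates extra columns of longer rows, like A ignores them),
--     # then two first-wins argmin scans.
--     w = len(arr[0])
--     col_sums = [0] * w
--     row_sums = []
--     for row in arr:
--         row_sums.append(sum(row))
--         col_sums = [c + v for c, v in zip(col_sums, row)]
--
--     def argmin(xs):
--         best_i = 0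
--         best_v = xs[0]
--         for i in range(1, len(xs)):
--             if xs[i] < best_v:
--                 best_i = i
--                 best_v = xs[i]
--         return best_i
--
--     return [argmin(row_sums), argmin(col_sums)]
-- ===== Notes on version B (the rewrite author's own statement) =====
-- stated objective: alternative
-- what changed: A re-scans all rows once per column (a fresh generator pass per column); B makes one row-major pass that builds the row-sum list and a running column-sum table, then two linear first-wins argmin scans.
import Mathlib
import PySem

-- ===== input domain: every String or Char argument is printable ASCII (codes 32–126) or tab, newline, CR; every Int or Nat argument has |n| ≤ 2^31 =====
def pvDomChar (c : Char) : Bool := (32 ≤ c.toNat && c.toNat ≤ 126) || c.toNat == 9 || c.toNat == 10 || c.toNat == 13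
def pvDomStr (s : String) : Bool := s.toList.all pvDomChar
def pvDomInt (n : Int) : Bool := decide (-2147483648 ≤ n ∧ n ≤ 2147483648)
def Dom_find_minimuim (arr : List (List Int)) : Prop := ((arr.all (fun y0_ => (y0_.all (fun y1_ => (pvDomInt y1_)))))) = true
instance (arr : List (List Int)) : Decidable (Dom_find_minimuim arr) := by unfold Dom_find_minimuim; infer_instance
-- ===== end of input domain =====

-- B replaces A's repeated per-column scans by one row-major pass that builds the
-- row-sum list and a running column-sum table, then two first-wins argmin scans.

-- ===== PORT A =====
def find_minimuim (arr : List (List Int)) : List Int :=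
  -- row with minimum sum, first-wins
  let minRow := (PySem.List.pyRange 1 (arr.length : Int)).foldl
    (fun (st : Int × Int) i =>
      let rowSum := (PySem.List.pyGetD arr i []).foldl (· + ·) 0
      if rowSum < st.2 then (i, rowSum) else st)
    (0, (PySem.List.pyGetD arr 0 []).foldl (· + ·) 0)
  -- column with minimum sum: each column re-scans all rows
  let minCol := (PySem.List.pyRange 1 ((PySem.List.pyGetD arr 0 []).length : Int)).foldl
    (fun (st : Int × Int) j =>
      let colSum := arr.foldl (fun s row => s + PySem.List.pyGetD row j 0) 0
      if colSum < st.2 then (j, colSum) else st)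
    (0, arr.foldl (fun s row => s + PySem.List.pyGetD row 0 0) 0)
  [minRow.1, minCol.1]

-- ===== PORT B =====
-- first index of the minimum of xs (manual scan, as in Source B's argmin)
def pvArgmin (xs : List Int) : Int :=
  ((PySem.List.pyRange 1 (xs.length : Int)).foldl
    (fun (st : Int × Int) i =>
      let v := PySem.List.pyGetD xs i 0
      if v < st.2 then (i, v) else st)
    (0, PySem.List.pyGetD xs 0 0)).1

def find_minimuim_alt (arr : List (List Int)) : List Int :=
  let w := (PySem.List.pyGetD arr 0 []).length
  let sums := arr.foldl
    (fun (st : List Int × List Int) row =>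
      (st.1 ++ [row.foldl (· + ·) 0], List.zipWith (· + ·) st.2 row))
    (([] : List Int), List.replicate w 0)
  [pvArgmin sums.1, pvArgmin sums.2]

-- ===== PRECONDITION & SPEC =====
-- Pre_ excludes exactly the inputs where A raises IndexError: empty arr, empty
-- first row, or some row shorter than the first row (the column scan indexes it).
def Pre_find_minimuim (arr : List (List Int)) : Prop :=
  arr ≠ [] ∧ arr.headI ≠ [] ∧ ∀ row ∈ arr, arr.headI.length ≤ row.length
instance (arr : List (List Int)) : Decidable (Pre_find_minimuim arr) := by
  unfold Pre_find_minimuim; infer_instance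

def pvWitness_find_minimuim : List (List Int) := [[3, 1], [0, 5]]

def Spec_find_minimuim (arr : List (List Int)) (out : List Int) : Prop := out = find_minimuim_alt arr
instance (arr : List (List Int)) (out : List Int) : Decidable (Spec_find_minimuim arr out) := by unfold Spec_find_minimuim; infer_instance

-- ===== CLAIM (what is proved, stated in full; the proofs are below) =====
def Claim_equal_find_minimuim : Prop := ∀ (arr : List (List Int)), Dom_find_minimuim arr → Pre_find_minimuim arr → Spec_find_minimuim arr (find_minimuim arr)

-- ===== LEMMAS AND PROOFS =====

-- B's paired fold splits into the row-sum map and the column-sum fold.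
theorem pvSums (arr : List (List Int)) (w : Nat) :
    arr.foldl
      (fun (st : List Int × List Int) row =>
        (st.1 ++ [row.foldl (· + ·) 0], List.zipWith (· + ·) st.2 row))
      (([] : List Int), List.replicate w 0)
    = (arr.map (fun r => r.foldl (· + ·) 0),
       arr.foldl (fun cs row => List.zipWith (· + ·) cs row) (List.replicate w 0)) := by
  refine (PySem.List.foldl_prod_mk
    (fun (s : List Int) (row : List Int) => s ++ [row.foldl (· + ·) 0])
    (fun (s : List Int) (row : List Int) => List.zipWith (· + ·) s row) arr [] _).trans ?_
  rw [PySem.List.foldl_append_singleton_eq_map, List.nil_append]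

-- B's running column-sum fold: length is preserved and entry j is the column-j
-- sum A computes, provided every row is at least as long as the table.
theorem pvColFold (arr : List (List Int)) (cs : List Int)
    (h : ∀ row ∈ arr, cs.length ≤ row.length) :
    (arr.foldl (fun cs row => List.zipWith (· + ·) cs row) cs).length = cs.length ∧
    ∀ (j : Nat), j < cs.length →
      (arr.foldl (fun cs row => List.zipWith (· + ·) cs row) cs).getD j 0
        = arr.foldl (fun s row => s + PySem.List.pyGetD row (j : Int) 0) (cs.getD j 0) := by
  induction arr generalizing cs with
  | nil => exact ⟨rfl, fun j hj => rfl⟩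
  | cons row rest ih =>
    have hrow : cs.length ≤ row.length := h row (List.mem_cons_self ..)
    have hlen : (List.zipWith (· + ·) cs row).length = cs.length := by
      rw [List.length_zipWith]; omega
    have h' : ∀ r ∈ rest, (List.zipWith (· + ·) cs row).length ≤ r.length :=
      fun r hr => hlen ▸ h r (List.mem_cons_of_mem _ hr)
    obtain ⟨ihl, ihg⟩ := ih (List.zipWith (· + ·) cs row) h'
    constructor
    · rw [List.foldl_cons, ihl, hlen]
    · intro j hj
      have hj' : j < (List.zipWith (· + ·) cs row).length := by omega
      have hstep : (List.zipWith (· + ·) cs row).getD j 0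
          = cs.getD j 0 + PySem.List.pyGetD row (j : Int) 0 := by
        rw [List.getD_eq_getElem _ _ hj', List.getElem_zipWith,
            List.getD_eq_getElem _ _ hj, PySem.List.pyGetD_natCast,
            List.getD_eq_getElem _ _ (by omega)]
      rw [List.foldl_cons, List.foldl_cons, ihg j hj', hstep]

-- ===== VERDICT (by name: the statement is the Claim_ definition above) =====
theorem find_minimuim_spec : Claim_equal_find_minimuim := by
  intro arr hdom hpre
  obtain ⟨hne, hpre⟩ := hpre
  obtain ⟨r0, rest, rfl⟩ : ∃ r0 rest, arr = r0 :: rest := by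
    cases arr with
    | nil => exact absurd rfl hne
    | cons a b => exact ⟨a, b, rfl⟩
  rw [List.headI_cons] at hpre
  obtain ⟨hr0, hrows⟩ := hpre
  have hwpos : 0 < r0.length := List.length_pos_iff.mpr hr0
  have hget0 : PySem.List.pyGetD (r0 :: rest) 0 ([] : List Int) = r0 := by
    simp [PySem.List.pyGetD]
  -- value-level bridge for the row sums
  have hrowv : ∀ i : Int,
      PySem.List.pyGetD ((r0 :: rest).map (fun r => r.foldl (· + ·) 0)) i 0
        = (PySem.List.pyGetD (r0 :: rest) i ([] : List Int)).foldl (· + ·) 0 := by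
    intro i
    simpa using PySem.List.pyGetD_map (fun r : List Int => r.foldl (· + ·) 0) (r0 :: rest) i []
  -- column-sum table facts
  obtain ⟨hclen, hcget⟩ := pvColFold (r0 :: rest) (List.replicate r0.length 0)
    (by intro row hr; simpa using hrows row hr)
  rw [List.length_replicate] at hclen
  have hcol : ∀ (j : Int), 0 ≤ j → j < (r0.length : Int) →
      PySem.List.pyGetD
          ((r0 :: rest).foldl (fun cs row => List.zipWith (· + ·) cs row)
            (List.replicate r0.length 0)) j 0
      = (r0 :: rest).foldl (fun s row => s + PySem.List.pyGetD row j 0) 0 := by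
    intro j h0 h1
    obtain ⟨n, rfl⟩ := Int.eq_ofNat_of_zero_le h0
    have hn : n < r0.length := by exact_mod_cast h1
    rw [PySem.List.pyGetD_natCast, List.getD_eq_getElem _ _ (by omega),
        ← List.getD_eq_getElem _ 0 (by omega : n < ((r0 :: rest).foldl (fun cs row => List.zipWith (· + ·) cs row) (List.replicate r0.length 0)).length),
        hcget n (by simpa using hn)]
    simp
  unfold Spec_find_minimuim find_minimuim find_minimuim_alt pvArgmin
  simp only [hget0, pvSums, hclen, List.length_map, List.length_cons]
  rw [List.cons.injEq]; refine ⟨?_, ?_⟩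
  · -- row component
    congr 1
    rw [show ((0 : Int), PySem.List.pyGetD ((r0 :: rest).map (fun r => r.foldl (· + ·) 0)) 0 0)
          = ((0 : Int), r0.foldl (· + ·) 0) from by rw [hrowv 0, hget0]]
    exact PySem.List.foldl_congr_mem _ _ _ _ (fun acc i _ => by rw [hrowv i])
  · rw [List.cons.injEq]; refine ⟨?_, rfl⟩
    -- column component
    congr 1
    rw [show ((0 : Int), PySem.List.pyGetD
            ((r0 :: rest).foldl (fun cs row => List.zipWith (· + ·) cs row)
              (List.replicate r0.length 0)) 0 0)
          = ((0 : Int), (r0 :: rest).foldl (fun s row => s + PySem.List.pyGetD row 0 0) 0) from by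
        rw [hcol 0 le_rfl (by exact_mod_cast hwpos)]]
    refine PySem.List.foldl_congr_mem _ _ _ _ ?_
    intro acc j hj
    obtain ⟨h1, h2⟩ := PySem.List.mem_pyRange_one.mp hj
    rw [hcol j (by omega) h2]
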